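-- pv_equiv track=rewrite | github.com/yuqingsh/data-focus-python-team-project | crime_data.py | crime_get_score
-- ===== SOURCE A (Python) =====
-- def crime_get_score(crime_dict):
--     """
--     This function returns the score for each city
--     :param crime_dict: the input cities crime statistics
--     :return: the score for each city
--     """
--     values = list(crime_dict.values())
--     values.sort()
--     values_dict = {}
--     max_score = 7
--
--     for i in range(len(values)):
--         if i == 0:
--             values_dict[values[i]] = max_score
--         else:
--             if values[i - 1] < values[i]:
--                 max_score -= 1
--             values_dict[values[i]] = max_score
--
--     ans = {}
--     for key, value in crime_dict.items():
--         ans[key] = values_dict[value]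
--
--     return ans
-- ===== SOURCE B (Python) =====
-- def crime_get_score(crime_dict):
--     """Score each city directly: 7 minus the number of distinct crime values
--     strictly below the city's value (no sorting, no running rank counter)."""
--     vals = set(crime_dict.values())
--     ans = {}
--     for key, value in crime_dict.items():
--         below = 0
--         for w in vals:
--             if w < value:
--                 below += 1
--         ans[key] = 7 - below
--     return ans
-- ===== Notes on version B (the rewrite author's own statement) =====
-- stated objective: alternative
-- what changed: Instead of sorting the values and sweeping them with a running max_score counter decremented on strict increases, B never sorts: it builds the set of distinct values once and scores each city directly as 7 minus the count of distinct values strictly below its value.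
import Mathlib
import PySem

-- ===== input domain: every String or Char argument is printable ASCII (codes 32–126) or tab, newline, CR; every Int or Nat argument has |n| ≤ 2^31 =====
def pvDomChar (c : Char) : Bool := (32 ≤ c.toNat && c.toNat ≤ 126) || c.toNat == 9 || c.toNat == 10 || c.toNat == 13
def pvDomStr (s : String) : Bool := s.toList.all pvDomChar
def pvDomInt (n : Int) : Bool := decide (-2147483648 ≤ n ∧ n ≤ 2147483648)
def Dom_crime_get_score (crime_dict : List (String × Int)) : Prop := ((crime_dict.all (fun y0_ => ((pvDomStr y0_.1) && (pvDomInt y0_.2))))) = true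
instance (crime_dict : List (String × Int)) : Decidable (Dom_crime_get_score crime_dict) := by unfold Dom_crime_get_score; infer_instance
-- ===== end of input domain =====

-- B never sorts: it scores each city directly as 7 minus the number of distinct
-- crime values strictly below its value (objective: alternative algorithm).

-- ===== PORT A =====
-- loop body of A's 'for i in range(len(values))', extracted as a named helper
def pvStepA (values : List Int) (st : PySem.Dict Int Int × Int) (i : Int) :
    PySem.Dict Int Int × Int :=
  if i == 0 then
    (st.1.insert (PySem.List.pyGetD values i 0) st.2, st.2)
  else
    let ms := if PySem.List.pyGetD values (i - 1) 0 < PySem.List.pyGetD values i 0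
              then st.2 - 1 else st.2
    (st.1.insert (PySem.List.pyGetD values i 0) ms, ms)

def crime_get_score (crime_dict : List (String × Int)) : List (String × Int) :=
  let values := PySem.List.sorted (crime_dict.map Prod.snd) (fun x => x)
  let st := (PySem.List.pyRange 0 (values.length : Int)).foldl (pvStepA values)
              (PySem.Dict.empty, 7)
  -- values_dict[value]: the key is always present (value ∈ values), so getD is exact here
  let ans := crime_dict.foldl
      (fun (d : PySem.Dict String Int) kv => d.insert kv.1 (st.1.getD kv.2 0))
      PySem.Dict.empty
  ans.items

-- ===== PORT B =====
def crime_get_score_alt (crime_dict : List (String × Int)) : List (String × Int) :=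
  let vals := PySem.Set.ofList (crime_dict.map Prod.snd)
  (crime_dict.foldl
      (fun (d : PySem.Dict String Int) kv =>
        d.insert kv.1
          (7 - vals.foldl (fun (below : Int) w => if w < kv.2 then below + 1 else below) 0))
      PySem.Dict.empty).items

-- ===== PRECONDITION & SPEC =====
def Spec_crime_get_score (crime_dict : List (String × Int)) (out : List (String × Int)) : Prop := out = crime_get_score_alt crime_dict
instance (crime_dict : List (String × Int)) (out : List (String × Int)) : Decidable (Spec_crime_get_score crime_dict out) := by unfold Spec_crime_get_score; infer_instance

-- ===== CLAIM (what is proved, stated in full; the proofs are below) =====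
def Claim_equal_crime_get_score : Prop := ∀ (crime_dict : List (String × Int)), Dom_crime_get_score crime_dict → Spec_crime_get_score crime_dict (crime_get_score crime_dict)

-- ===== LEMMAS AND PROOFS =====

-- structural form of A's loop: carries the previous value instead of indexing
def pvLoopA : List Int → Option Int → PySem.Dict Int Int → Int → PySem.Dict Int Int × Int
  | [], _, d, ms => (d, ms)
  | v :: rest, none, d, ms => pvLoopA rest (some v) (d.insert v ms) ms
  | v :: rest, some p, d, ms =>
      let ms' := if p < v then ms - 1 else ms
      pvLoopA rest (some v) (d.insert v ms') ms'

lemma pvBridge (values : List Int) : ∀ (n k : Nat), values.length - k = n → 1 ≤ k →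
    k ≤ values.length → ∀ (d : PySem.Dict Int Int) (ms : Int),
    (PySem.List.pyRange (k : Int) (values.length : Int)).foldl (pvStepA values) (d, ms)
      = pvLoopA (values.drop k) (some (values.getD (k - 1) 0)) d ms := by
  intro n
  induction n with
  | zero =>
      intro k hnk h1 hk d ms
      have hkl : k = values.length := by omega
      subst hkl
      rw [PySem.List.pyRange_one_eq_nil (le_refl _)]
      simp [pvLoopA]
  | succ n ih =>
      intro k hnk h1 hk d ms
      have hklt : k < values.length := by omega
      rw [PySem.List.pyRange_one_cons (by exact_mod_cast hklt)]
      simp only [List.foldl_cons]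
      have hne : ((k : Int) == 0) = false := by
        simp only [beq_eq_false_iff_ne]
        omega
      have hget_i : PySem.List.pyGetD values (k : Int) 0 = values[k] := by
        rw [PySem.List.pyGetD_eq_getElem values 0 (by positivity) (by exact_mod_cast hklt)]
        congr 1
      have hget_p : PySem.List.pyGetD values ((k : Int) - 1) 0 = values.getD (k - 1) 0 := by
        have h : (k : Int) - 1 = ((k - 1 : Nat) : Int) := by omega
        rw [h, PySem.List.pyGetD_natCast]
      have hstep : pvStepA values (d, ms) (k : Int) =
          (d.insert values[k] (if values.getD (k - 1) 0 < values[k] then ms - 1 else ms),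
           (if values.getD (k - 1) 0 < values[k] then ms - 1 else ms)) := by
        unfold pvStepA
        rw [hne]
        simp only [Bool.false_eq_true, if_false, hget_i, hget_p]
      rw [hstep]
      have hcast : (k : Int) + 1 = ((k + 1 : Nat) : Int) := by push_cast; ring
      rw [hcast, ih (k + 1) (by omega) (by omega) (by omega)]
      conv_rhs => rw [List.drop_eq_getElem_cons hklt]
      simp only [pvLoopA, Nat.add_sub_cancel]
      rw [List.getD_eq_getElem values 0 hklt]

lemma pvFoldA (values : List Int) :
    (PySem.List.pyRange 0 (values.length : Int)).foldl (pvStepA values) (PySem.Dict.empty, 7)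
      = pvLoopA values none PySem.Dict.empty 7 := by
  cases values with
  | nil => rw [PySem.List.pyRange_one_eq_nil (by simp)]; simp [pvLoopA]
  | cons v rest =>
      rw [PySem.List.pyRange_one_cons (by exact_mod_cast Nat.succ_pos rest.length)]
      simp only [List.foldl_cons]
      have hstep : pvStepA (v :: rest) (PySem.Dict.empty, 7) 0 =
          (PySem.Dict.empty.insert v 7, 7) := by
        unfold pvStepA
        simp only [BEq.rfl, if_true]
        rw [PySem.List.pyGetD_eq_getElem (v :: rest) 0 (le_refl _) (by exact_mod_cast Nat.succ_pos rest.length)]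
        rfl
      rw [hstep]
      have h1 : (0 : Int) + 1 = ((1 : Nat) : Int) := by norm_num
      rw [h1, pvBridge (v :: rest) rest.length 1 (by simp) (le_refl _) (by simp)]
      simp [pvLoopA]

lemma pvLoopA_getD (s : List Int) :
    ∀ (p ms : Int) (d : PySem.Dict Int Int),
    s.Pairwise (· ≤ ·) → (∀ x ∈ s, p ≤ x) → ∀ u : Int,
    (pvLoopA s (some p) d ms).1.getD u 0 =
      if u ∈ s then ms - ((s.toFinset.filter (fun w => p < w ∧ w ≤ u)).card : Int)
      else d.getD u 0 := by
  induction s with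
  | nil => intro p ms d _ _ u; simp [pvLoopA]
  | cons v rest ih =>
      intro p ms d hs hp u
      have hvrest : ∀ x ∈ rest, v ≤ x := (List.pairwise_cons.mp hs).1
      have hrest : rest.Pairwise (· ≤ ·) := (List.pairwise_cons.mp hs).2
      have hpv : p ≤ v := hp v (List.mem_cons_self)
      simp only [pvLoopA]
      rw [ih v _ _ hrest hvrest u]
      by_cases hu : u ∈ rest
      · have hvu : v ≤ u := hvrest u hu
        rw [if_pos hu, if_pos (List.mem_cons_of_mem v hu)]
        have hset : ((v :: rest).toFinset.filter (fun w => p < w ∧ w ≤ u)) =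
            if p < v then insert v (rest.toFinset.filter (fun w => v < w ∧ w ≤ u))
            else rest.toFinset.filter (fun w => v < w ∧ w ≤ u) := by
          split_ifs with hplt
          · ext w
            simp only [List.toFinset_cons, Finset.mem_insert, Finset.mem_filter,
              List.mem_toFinset]
            constructor
            · rintro ⟨hw | hw, hpw, hwu⟩
              · exact Or.inl hw
              · by_cases hwv : w = v
                · exact Or.inl hwv
                · exact Or.inr ⟨hw, lt_of_le_of_ne (hvrest w hw) (Ne.symm hwv), hwu⟩
            · rintro (hw | ⟨hw, hvw, hwu⟩)
              · exact ⟨Or.inl hw, by omega⟩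
              · exact ⟨Or.inr hw, by omega, hwu⟩
          · ext w
            simp only [List.toFinset_cons, Finset.mem_insert, Finset.mem_filter,
              List.mem_toFinset]
            constructor
            · rintro ⟨hw | hw, hpw, hwu⟩
              · omega
              · have := hvrest w hw
                exact ⟨hw, by omega, hwu⟩
            · rintro ⟨hw, hvw, hwu⟩
              exact ⟨Or.inr hw, by omega, hwu⟩
        rw [hset]
        split_ifs with hplt
        · rw [Finset.card_insert_of_notMem (by simp)]
          push_cast
          ring
        · ring_nf
      · rw [if_neg hu]
        by_cases huv : u = v
        · subst huv
          rw [PySem.Dict.getD_insert_self, if_pos (List.mem_cons_self)]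
          have hset : ((u :: rest).toFinset.filter (fun w => p < w ∧ w ≤ u)) =
              if p < u then {u} else ∅ := by
            split_ifs with hplt
            · ext w
              simp only [List.toFinset_cons, Finset.mem_insert, Finset.mem_filter,
                List.mem_toFinset, Finset.mem_singleton]
              constructor
              · rintro ⟨hw | hw, hpw, hwu⟩
                · exact hw
                · have := hvrest w hw; omega
              · rintro rfl; exact ⟨Or.inl rfl, hplt, le_refl _⟩
            · ext w
              simp only [List.toFinset_cons, Finset.mem_insert, Finset.mem_filter,
                List.mem_toFinset, Finset.notMem_empty, iff_false, not_and]
              rintro (hw | hw)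
              · omega
              · have := hvrest w hw; omega
          rw [hset]
          split_ifs with hplt <;> simp
        · rw [PySem.Dict.getD_insert_of_ne _ _ _ huv,
            if_neg (by simp [huv, hu])]

-- A's per-value score: 7 minus the number of distinct values strictly below u
lemma pvA_getD (vs : List Int) (u : Int) (hu : u ∈ vs) :
    (pvLoopA (PySem.List.sorted vs (fun x => x)) none PySem.Dict.empty 7).1.getD u 0
      = 7 - ((vs.toFinset.filter (fun w => w < u)).card : Int) := by
  have hperm : (PySem.List.sorted vs (fun x => x)).Perm vs :=
    PySem.List.sorted_perm vs (fun x => x) false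
  have hfin : (PySem.List.sorted vs (fun x => x)).toFinset = vs.toFinset :=
    List.toFinset_eq_of_perm _ _ hperm
  have hus : u ∈ PySem.List.sorted vs (fun x => x) :=
    (PySem.List.mem_sorted vs (fun x => x) false u).mpr hu
  have hpw : (PySem.List.sorted vs (fun x => x)).Pairwise (· ≤ ·) :=
    PySem.List.sorted_pairwise vs (fun x => x)
  rcases hsv : PySem.List.sorted vs (fun x => x) with _ | ⟨v0, rest⟩
  · rw [hsv] at hus; simp at hus
  · rw [hsv] at hus hpw hfin
    have hv0rest : ∀ x ∈ rest, v0 ≤ x := (List.pairwise_cons.mp hpw).1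
    have hrest : rest.Pairwise (· ≤ ·) := (List.pairwise_cons.mp hpw).2
    simp only [pvLoopA]
    rw [pvLoopA_getD rest v0 7 _ hrest hv0rest u]
    rw [← hfin]
    by_cases hur : u ∈ rest
    · have hvu : v0 ≤ u := hv0rest u hur
      rw [if_pos hur]
      have hA : (rest.toFinset.filter (fun w => v0 < w ∧ w ≤ u)) =
          if v0 < u then insert u (rest.toFinset.filter (fun w => v0 < w ∧ w < u)) else ∅ := by
        split_ifs with hlt
        · ext w
          simp only [Finset.mem_filter, Finset.mem_insert, List.mem_toFinset]
          constructor
          · rintro ⟨hw, hvw, hwu⟩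
            rcases eq_or_lt_of_le hwu with rfl | hlt2
            · exact Or.inl rfl
            · exact Or.inr ⟨hw, hvw, hlt2⟩
          · rintro (rfl | ⟨hw, hvw, hwu⟩)
            · exact ⟨hur, hlt, le_refl _⟩
            · exact ⟨hw, hvw, le_of_lt hwu⟩
        · ext w
          simp only [Finset.mem_filter, List.mem_toFinset, Finset.notMem_empty,
            iff_false, not_and]
          intro _ h1
          omega
      have hB : ((v0 :: rest).toFinset.filter (fun w => w < u)) =
          if v0 < u then insert v0 (rest.toFinset.filter (fun w => v0 < w ∧ w < u)) else ∅ := by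
        split_ifs with hlt
        · ext w
          simp only [List.toFinset_cons, Finset.mem_insert, Finset.mem_filter,
            List.mem_toFinset]
          constructor
          · rintro ⟨hw | hw, hwu⟩
            · exact Or.inl hw
            · by_cases hwv : w = v0
              · exact Or.inl hwv
              · exact Or.inr ⟨hw, lt_of_le_of_ne (hv0rest w hw) (Ne.symm hwv), hwu⟩
          · rintro (rfl | ⟨hw, hvw, hwu⟩)
            · exact ⟨Or.inl rfl, hlt⟩
            · exact ⟨Or.inr hw, hwu⟩
        · ext w
          simp only [List.toFinset_cons, Finset.mem_insert, Finset.mem_filter,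
            List.mem_toFinset, Finset.notMem_empty, iff_false, not_and]
          rintro (hw | hw)
          · omega
          · have := hv0rest w hw; omega
      rw [hA, hB]
      split_ifs with hlt
      · rw [Finset.card_insert_of_notMem (by simp), Finset.card_insert_of_notMem (by simp)]
      · rfl
    · have huv : u = v0 := by
        rcases List.mem_cons.mp hus with h | h
        · exact h
        · exact absurd h hur
      subst huv
      rw [if_neg hur, PySem.Dict.getD_insert_self]
      have hempty : ((u :: rest).toFinset.filter (fun w => w < u)) = ∅ := by
        ext w
        simp only [List.toFinset_cons, Finset.mem_insert, Finset.mem_filter,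
          List.mem_toFinset, Finset.notMem_empty, iff_false, not_and]
        rintro (hw | hw)
        · omega
        · have := hv0rest w hw; omega
      rw [hempty]
      simp

-- B's inner loop counts the elements of the list that are strictly below u
lemma pvCount (u : Int) (l : List Int) : ∀ (acc : Int),
    l.foldl (fun below w => if w < u then below + 1 else below) acc
      = acc + ((l.filter (fun w => decide (w < u))).length : Int) := by
  induction l with
  | nil => intro acc; simp
  | cons w rest ih =>
      intro acc
      simp only [List.foldl_cons, List.filter_cons]
      by_cases hw : w < u
      · rw [if_pos hw, if_pos (by simpa using hw), ih, List.length_cons]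
        push_cast
        ring
      · rw [if_neg hw, if_neg (by simpa using hw), ih]

-- B's per-value score equals A's: 7 minus the number of distinct values strictly below u
lemma pvB_count (vs : List Int) (u : Int) :
    (PySem.Set.ofList vs).foldl (fun (below : Int) w => if w < u then below + 1 else below) 0
      = ((vs.toFinset.filter (fun w => w < u)).card : Int) := by
  rw [pvCount, zero_add]
  congr 1
  have hnd : (PySem.Set.ofList vs).Nodup := PySem.Set.nodup_ofList vs
  have hfin : vs.toFinset = (PySem.Set.ofList vs).toFinset := by
    ext w
    simp [PySem.Set.mem_ofList]
  have hfin2 : (PySem.Set.ofList vs).toFinset.filter (fun w => w < u)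
      = ((PySem.Set.ofList vs).filter (fun w => decide (w < u))).toFinset := by
    rw [List.toFinset_filter]
    simp
  rw [hfin, hfin2, List.toFinset_card_of_nodup (hnd.filter _)]

-- ===== VERDICT (by name: the statement is the Claim_ definition above) =====
theorem crime_get_score_spec : Claim_equal_crime_get_score := by
  intro crime_dict _
  unfold Spec_crime_get_score crime_get_score crime_get_score_alt
  simp only []
  rw [pvFoldA]
  congr 1
  apply PySem.List.foldl_congr_mem
  intro acc kv hkv
  have hv : kv.2 ∈ crime_dict.map Prod.snd := List.mem_map_of_mem hkv
  rw [pvA_getD _ _ hv, pvB_count]
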